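-- pv_equiv track=rewrite | github.com/GundalaNikhil/DSA | dsa-problems/verify_recursion_testcases_part2.py | can_reach_target_editorial
-- ===== SOURCE A (Python) =====
-- def can_reach_target_editorial(arr, k, target):
--     """Check if target is reachable by negating at most k elements."""
--     n = len(arr)
--
--     # Try all combinations of negations
--     for mask in range(1 << n):
--         if bin(mask).count('1') > k:
--             continue
--
--         temp_sum = sum(arr[i] if not (mask & (1 << i)) else -arr[i] for i in range(n))
--         if temp_sum == target:
--             return "YES"
--
--     return "NO"
-- ===== SOURCE B (Python) =====
-- def can_reach_target_editorial(arr, k, target):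
--     """Check if target is reachable by negating at most k elements."""
--     if k < 0:
--         return "NO"
--
--     def go(rest, budget, t):
--         # remaining target t must be produced from `rest` using <= budget negations
--         if not rest:
--             return t == 0
--         x = rest[0]
--         return go(rest[1:], budget, t - x) or (budget > 0 and go(rest[1:], budget - 1, t + x))
--
--     return "YES" if go(arr, k, target) else "NO"
-- ===== Notes on version B (the rewrite author's own statement) =====
-- stated objective: alternative
-- what changed: Replaces the exhaustive enumeration of all 2^n bitmasks (with a per-mask bin()-string popcount and an O(n) indexed re-summation) by a direct recursion over the list that branches on keep/negate per element, carrying the remaining negation budget and remaining target.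
import Mathlib
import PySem

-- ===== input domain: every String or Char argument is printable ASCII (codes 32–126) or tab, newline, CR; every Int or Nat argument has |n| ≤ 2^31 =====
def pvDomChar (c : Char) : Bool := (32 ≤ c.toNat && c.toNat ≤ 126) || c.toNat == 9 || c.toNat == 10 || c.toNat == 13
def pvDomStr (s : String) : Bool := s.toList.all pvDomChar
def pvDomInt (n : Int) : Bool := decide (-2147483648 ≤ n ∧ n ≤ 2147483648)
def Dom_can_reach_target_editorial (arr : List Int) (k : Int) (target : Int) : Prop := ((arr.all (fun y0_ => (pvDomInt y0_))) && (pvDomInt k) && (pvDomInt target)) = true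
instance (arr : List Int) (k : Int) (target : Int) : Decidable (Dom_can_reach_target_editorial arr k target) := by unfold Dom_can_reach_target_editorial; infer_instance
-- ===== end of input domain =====

-- B replaces A's enumeration of all 2^n bitmasks by a keep/negate recursion over the list
-- carrying the remaining negation budget (objective: alternative algorithm).

-- ===== PORT A =====
-- temp_sum = sum(arr[i] if not (mask & (1 << i)) else -arr[i] for i in range(n));
-- indices i run over range(n) with n = len(arr), so pyGetD's default is never used.
def pvSignedSum (arr : List Int) (mask : Int) (n : Nat) : Int :=
  (PySem.List.pyRange 0 n 1).foldl
    (fun acc i =>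
      acc + (if PySem.Int.band mask ((1 : Int) <<< i.toNat) = 0
             then PySem.List.pyGetD arr i 0 else -(PySem.List.pyGetD arr i 0))) 0

-- the `for mask in range(1 << n)` loop with its two early-`continue`/`return` branches
def pvALoop (arr : List Int) (k target : Int) (n : Nat) : List Int → String
  | [] => "NO"
  | m :: ms =>
    if (PySem.Str.count (PySem.Int.pyBin m) "1" : Int) > k then pvALoop arr k target n ms
    else if pvSignedSum arr m n = target then "YES"
    else pvALoop arr k target n ms

def can_reach_target_editorial (arr : List Int) (k : Int) (target : Int) : String :=
  pvALoop arr k target arr.length (PySem.List.pyRange 0 ((1 : Int) <<< arr.length) 1)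

-- ===== PORT B =====
def pvGo : List Int → Int → Int → Bool
  | [], _, t => t == 0
  | x :: rest, budget, t =>
    pvGo rest budget (t - x) || (decide (budget > 0) && pvGo rest (budget - 1) (t + x))

def can_reach_target_editorial_alt (arr : List Int) (k : Int) (target : Int) : String :=
  if k < 0 then "NO"
  else if pvGo arr k target then "YES" else "NO"

-- ===== PRECONDITION & SPEC =====
def Spec_can_reach_target_editorial (arr : List Int) (k : Int) (target : Int) (out : String) : Prop := out = can_reach_target_editorial_alt arr k target
instance (arr : List Int) (k : Int) (target : Int) (out : String) : Decidable (Spec_can_reach_target_editorial arr k target out) := by unfold Spec_can_reach_target_editorial; infer_instance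

-- ===== CLAIM (what is proved, stated in full; the proofs are below) =====
def Claim_equal_can_reach_target_editorial : Prop := ∀ (arr : List Int) (k : Int) (target : Int), Dom_can_reach_target_editorial arr k target → Spec_can_reach_target_editorial arr k target (can_reach_target_editorial arr k target)


-- ===== LEMMAS AND PROOFS =====

-- signed sum selected by the low bits of a Nat mask (the common mathematical shape)
def pvMSum : List Int → Nat → Int
  | [], _ => 0
  | x :: r, m => (if m % 2 = 1 then -x else x) + pvMSum r (m / 2)

-- `Chars.count` with a one-character needle is `List.count`
theorem pv_count_go_singleton (c : Char) (l : List Char) (fuel acc : Nat)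
    (h : l.length ≤ fuel) :
    PySem.Chars.count.go [c] fuel l acc = acc + l.count c := by
  induction l generalizing fuel acc with
  | nil => cases fuel <;> simp [PySem.Chars.count.go]
  | cons a t ih =>
    cases fuel with
    | zero => simp at h
    | succ f =>
      rw [PySem.Chars.count.go]
      by_cases hc : c = a
      · subst hc
        simp only [List.isPrefixOf, BEq.rfl, Bool.true_and, if_pos]
        rw [List.length_singleton, List.drop_one, List.tail_cons,
          ih f (acc + 1) (by simpa using h)]
        simp
        omega
      · have hbe : (c == a) = false := by simp [hc]
        simp only [List.isPrefixOf, hbe, Bool.false_and, if_neg, Bool.false_eq_true,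
          not_false_iff]
        rw [ih f acc (by simpa using h)]
        simp [Ne.symm hc]

theorem pv_count_singleton (c : Char) (l : List Char) :
    PySem.Chars.count l [c] = l.count c := by
  simpa [PySem.Chars.count] using pv_count_go_singleton c l l.length 0 le_rfl

-- counting '1' digits of a binary rendering is bitCount
theorem pv_digits_count (m : Nat) :
    (Nat.toDigits 2 m).count '1' = PySem.Int.bitCount (m : Int) := by
  induction m using Nat.strong_induction_on with
  | _ m ih =>
    by_cases h : m < 2
    · interval_cases m <;> decide
    · rw [Nat.toDigits_of_base_le (by norm_num) (by omega),
        PySem.Int.bitCount_natCast (by omega)]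
      rw [List.count_append, ih (m / 2) (by omega)]
      have h2 : m % 2 = 0 ∨ m % 2 = 1 := by omega
      rcases h2 with h2 | h2 <;> simp [h2, Nat.digitChar] <;> omega

theorem pv_pybin_count (m : Nat) :
    PySem.Str.count (PySem.Int.pyBin (m : Int)) "1" = PySem.Int.bitCount (m : Int) := by
  rw [PySem.Str.count_eq, PySem.Int.toList_pyBin]
  have h0b : PySem.Int.toBinChars0b (m : Int) = '0' :: 'b' :: Nat.toDigits 2 m := by
    simp [PySem.Int.toBinChars0b]
  have h1 : ("1" : String).toList = ['1'] := by decide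
  rw [h0b, h1, pv_count_singleton]
  simp [pv_digits_count]

-- the testBit sum that both A's generator and pvMSum compute
theorem pv_msum_eq_sum (arr : List Int) (m : Nat) :
    ((List.range arr.length).map
      (fun j => if m.testBit j then -(arr.getD j 0) else arr.getD j 0)).sum = pvMSum arr m := by
  induction arr generalizing m with
  | nil => simp [pvMSum]
  | cons x r ih =>
    rw [List.length_cons, List.range_succ_eq_map]
    simp only [List.map_cons, List.map_map, List.sum_cons, Function.comp_def,
      Nat.succ_eq_add_one, List.getD_cons_succ, List.getD_cons_zero, Nat.testBit_succ,
      Nat.testBit_zero]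
    rw [ih (m / 2)]
    by_cases hp : m % 2 = 1 <;> simp [pvMSum, hp]

-- A's generator sum equals the recursive signed sum
theorem pv_signedSum_eq (arr : List Int) (m : Nat) :
    pvSignedSum arr (m : Int) arr.length = pvMSum arr m := by
  unfold pvSignedSum
  rw [PySem.List.pyRange_one, PySem.List.foldl_add]
  simp only [List.map_map, zero_add, Int.sub_zero, Int.toNat_natCast, Function.comp_def]
  rw [← pv_msum_eq_sum arr m]
  congr 1
  apply List.map_congr_left
  intro j _
  have hband : PySem.Int.band (m : Int) ((1 : Int) <<< ((j : Nat) : Int)) = ((m &&& 2 ^ j : Nat) : Int) := by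
    rw [Int.one_shiftLeft, PySem.Int.band_natCast]
  have hget : PySem.List.pyGetD arr ((j : Nat) : Int) 0 = arr.getD j 0 := by
    simp
  simp only [hband, hget, Nat.and_two_pow]
  by_cases hbit : m.testBit j <;> simp [hbit]

-- characterisation of A's loop
theorem pv_aloop_char (arr : List Int) (k target : Int) (n : Nat) (ms : List Int) :
    pvALoop arr k target n ms =
      (if ∃ m ∈ ms, ¬((PySem.Str.count (PySem.Int.pyBin m) "1" : Int) > k) ∧ pvSignedSum arr m n = target
       then "YES" else "NO") := by
  induction ms with
  | nil => simp [pvALoop]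
  | cons m ms ih =>
    rw [pvALoop]
    by_cases h1 : (PySem.Str.count (PySem.Int.pyBin m) "1" : Int) > k
    · rw [if_pos h1, ih]
      by_cases h2 : ∃ m' ∈ ms, ¬((PySem.Str.count (PySem.Int.pyBin m') "1" : Int) > k) ∧ pvSignedSum arr m' n = target
      · rw [if_pos h2, if_pos]
        obtain ⟨m', hm', hc⟩ := h2
        exact ⟨m', List.mem_cons_of_mem _ hm', hc⟩
      · rw [if_neg h2, if_neg]
        rintro ⟨m', hm', hc⟩
        rcases List.mem_cons.mp hm' with rfl | hm'
        · exact hc.1 h1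
        · exact h2 ⟨m', hm', hc⟩
    · rw [if_neg h1]
      by_cases h2 : pvSignedSum arr m n = target
      · rw [if_pos h2, if_pos ⟨m, List.mem_cons_self, h1, h2⟩]
      · rw [if_neg h2, ih]
        by_cases h3 : ∃ m' ∈ ms, ¬((PySem.Str.count (PySem.Int.pyBin m') "1" : Int) > k) ∧ pvSignedSum arr m' n = target
        · rw [if_pos h3, if_pos]
          obtain ⟨m', hm', hc⟩ := h3
          exact ⟨m', List.mem_cons_of_mem _ hm', hc⟩
        · rw [if_neg h3, if_neg]
          rintro ⟨m', hm', hc⟩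
          rcases List.mem_cons.mp hm' with rfl | hm'
          · exact h2 hc.2
          · exact h3 ⟨m', hm', hc⟩

theorem pv_bc_double (m : Nat) :
    PySem.Int.bitCount ((2 * m : Nat) : Int) = PySem.Int.bitCount (m : Int) := by
  rcases Nat.eq_zero_or_pos m with rfl | hm
  · simp
  · rw [PySem.Int.bitCount_natCast (by omega)]
    have : 2 * m % 2 = 0 := by omega
    rw [this]
    have : 2 * m / 2 = m := by omega
    rw [this]
    omega

theorem pv_bc_double_one (m : Nat) :
    PySem.Int.bitCount ((2 * m + 1 : Nat) : Int) = PySem.Int.bitCount (m : Int) + 1 := by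
  rw [PySem.Int.bitCount_natCast (by omega)]
  have h1 : (2 * m + 1) % 2 = 1 := by omega
  have h2 : (2 * m + 1) / 2 = m := by omega
  rw [h1, h2]; omega

-- characterisation of B's recursion
theorem pv_go_char (arr : List Int) (b t : Int) (hb : 0 ≤ b) :
    pvGo arr b t = true ↔
      ∃ m : Nat, m < 2 ^ arr.length ∧ (PySem.Int.bitCount (m : Int) : Int) ≤ b ∧ pvMSum arr m = t := by
  induction arr generalizing b t with
  | nil =>
    simp only [pvGo, List.length_nil, pow_zero, Nat.lt_one_iff, beq_iff_eq]
    constructor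
    · rintro rfl
      exact ⟨0, rfl, by simpa using hb, rfl⟩
    · rintro ⟨m, rfl, _, hs⟩
      simpa [pvMSum] using hs.symm
  | cons x r ih =>
    rw [pvGo]
    constructor
    · intro h
      rw [Bool.or_eq_true] at h
      rcases h with h1 | h2
      · obtain ⟨m, hm, hbc, hs⟩ := (ih b (t - x) hb).mp h1
        refine ⟨2 * m, by rw [List.length_cons, pow_succ]; omega, ?_, ?_⟩
        · rwa [pv_bc_double]
        · show (if 2 * m % 2 = 1 then -x else x) + pvMSum r (2 * m / 2) = t
          have e1 : 2 * m % 2 = 0 := by omega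
          have e2 : 2 * m / 2 = m := by omega
          rw [e1, e2, if_neg (by omega), hs]; ring
      · rw [Bool.and_eq_true] at h2
        obtain ⟨hpos, h2'⟩ := h2
        have hpos' : 0 < b := of_decide_eq_true hpos
        obtain ⟨m, hm, hbc, hs⟩ := (ih (b - 1) (t + x) (by omega)).mp h2'
        refine ⟨2 * m + 1, by rw [List.length_cons, pow_succ]; omega, ?_, ?_⟩
        · rw [pv_bc_double_one]; push_cast; omega
        · show (if (2 * m + 1) % 2 = 1 then -x else x) + pvMSum r ((2 * m + 1) / 2) = t
          have e1 : (2 * m + 1) % 2 = 1 := by omega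
          have e2 : (2 * m + 1) / 2 = m := by omega
          rw [e1, e2, if_pos rfl, hs]; ring
    · rintro ⟨m, hm, hbc, hs⟩
      have hm2 : m / 2 < 2 ^ r.length := by
        rw [List.length_cons, pow_succ] at hm; omega
      have hdec : m = 2 * (m / 2) + m % 2 := by omega
      by_cases hp : m % 2 = 1
      · rw [Bool.or_eq_true]; right
        have hbc' : PySem.Int.bitCount (m : Int) = PySem.Int.bitCount ((m / 2 : Nat) : Int) + 1 := by
          conv_lhs => rw [hdec, hp]
          exact pv_bc_double_one (m / 2)
        have hbpos : 0 < b := by rw [hbc'] at hbc; push_cast at hbc; omega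
        rw [Bool.and_eq_true]
        refine ⟨decide_eq_true hbpos, ?_⟩
        apply (ih (b - 1) (t + x) (by omega)).mpr
        refine ⟨m / 2, hm2, by rw [hbc'] at hbc; push_cast at hbc ⊢; omega, ?_⟩
        have := hs
        rw [show pvMSum (x :: r) m = (if m % 2 = 1 then -x else x) + pvMSum r (m / 2) from rfl, hp] at this
        simp at this
        omega
      · rw [Bool.or_eq_true]; left
        have hp0 : m % 2 = 0 := by omega
        have hbc' : PySem.Int.bitCount (m : Int) = PySem.Int.bitCount ((m / 2 : Nat) : Int) := by
          conv_lhs => rw [hdec, hp0]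
          simpa using pv_bc_double (m / 2)
        apply (ih b (t - x) hb).mpr
        refine ⟨m / 2, hm2, by rw [hbc'] at hbc; exact hbc, ?_⟩
        have := hs
        rw [show pvMSum (x :: r) m = (if m % 2 = 1 then -x else x) + pvMSum r (m / 2) from rfl, hp0] at this
        simp at this
        omega

-- ===== VERDICT (by name: the statement is the Claim_ definition above) =====
theorem can_reach_target_editorial_spec : Claim_equal_can_reach_target_editorial := by
  intro arr k target _
  unfold Spec_can_reach_target_editorial can_reach_target_editorial can_reach_target_editorial_alt
  rw [pv_aloop_char]
  have hpow : (1 : Int) <<< arr.length = ((2 ^ arr.length : Nat) : Int) := by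
    first
    | exact Int.one_shiftLeft _
    | (rw [Int.shiftLeft_eq']; ring)
  by_cases hk : k < 0
  · rw [if_pos hk, if_neg]
    rintro ⟨m, _, hcnt, _⟩
    have h0 := Int.natCast_nonneg (PySem.Str.count (PySem.Int.pyBin m) "1")
    omega
  · rw [if_neg hk]
    have hk' : 0 ≤ k := by omega
    have key : (∃ m ∈ PySem.List.pyRange 0 ((1 : Int) <<< arr.length) 1,
        ¬((PySem.Str.count (PySem.Int.pyBin m) "1" : Int) > k) ∧
        pvSignedSum arr m arr.length = target) ↔ pvGo arr k target = true := by
      rw [pv_go_char arr k target hk']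
      constructor
      · rintro ⟨m, hmem, hcnt, hsum⟩
        rw [PySem.List.mem_pyRange_one] at hmem
        obtain ⟨h0, hlt⟩ := hmem
        rw [hpow] at hlt
        have hmn : m = ((m.toNat : Nat) : Int) := (Int.toNat_of_nonneg h0).symm
        rw [hmn] at hcnt hsum
        rw [pv_pybin_count] at hcnt
        rw [pv_signedSum_eq] at hsum
        exact ⟨m.toNat, by omega, by omega, hsum⟩
      · rintro ⟨mn, hlt, hbc, hsum⟩
        refine ⟨(mn : Int), ?_, ?_, ?_⟩
        · rw [PySem.List.mem_pyRange_one, hpow]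
          constructor
          · exact Int.natCast_nonneg mn
          · exact_mod_cast hlt
        · rw [pv_pybin_count]; omega
        · rw [pv_signedSum_eq]; exact hsum
    by_cases hg : pvGo arr k target = true
    · rw [if_pos (key.mpr hg), hg]
      rfl
    · rw [if_neg (fun hc => hg (key.mp hc)), if_neg (by simpa using hg)]
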